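-- pv_equiv track=rewrite | github.com/mpirtskh/ai-diagram-service | app/tools/diagram_tools.py | parse_llm_diagram_response
-- ===== SOURCE A (Python) =====
-- def parse_llm_diagram_response(response: str):
--     """
--     Parse the response from the LLM to extract components and connections.
--
--     This function takes the AI's response and tries to figure out:
--     - What components they want in the diagram
--     - How those components should be connected
--
--     Args:
--         response: The AI's response (should be structured)
--
--     Returns:
--         Tuple of (components list, connections list)
--     """
--     components = []
--     connections = []
--
--     # Split the response into lines and look for patterns
--     lines = response.split('\n')
--     in_components = False
--     in_connections = False
--
--     for line in lines:
--         line = line.strip()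
--
--         # Look for section headers
--         if "components:" in line.lower():
--             in_components = True
--             in_connections = False
--             continue
--         elif "connections:" in line.lower():
--             in_components = False
--             in_connections = True
--             continue
--
--         # Extract components
--         if in_components and line and not line.startswith('-'):
--             if ':' in line:
--                 component = line.split(':')[1].strip()
--             else:
--                 component = line.strip()
--             if component:
--                 components.append(component)
--
--         # Extract connections
--         elif in_connections and line and not line.startswith('-'):
--             if '->' in line or 'connects' in line.lower():
--                 connections.append(line.strip())
--
--     # If we didn't find anything, use some defaults
--     if not components:
--         components = ["Web Server", "Database"]
--     if not connections:
--         connections = ["Web Server -> Database"]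
--
--     return components, connections
-- ===== SOURCE B (Python) =====
-- def parse_llm_diagram_response(response: str):
--     # Group-then-process: one pass assigns stripped lines to a bucket per the
--     # most recent section header, then two separate passes build the outputs.
--     comp_lines = []
--     conn_lines = []
--     bucket = None  # 'c' while in components, 'n' while in connections
--     for raw in response.split('\n'):
--         line = raw.strip()
--         low = line.lower()
--         if "components:" in low:
--             bucket = 'c'
--         elif "connections:" in low:
--             bucket = 'n'
--         elif bucket == 'c':
--             comp_lines.append(line)
--         elif bucket == 'n':
--             conn_lines.append(line)
--
--     components = []
--     for line in comp_lines:
--         if line and not line.startswith('-'):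
--             component = (line.split(':')[1] if ':' in line else line).strip()
--             if component:
--                 components.append(component)
--
--     connections = [line for line in conn_lines
--                    if line and not line.startswith('-')
--                    and ('->' in line or 'connects' in line.lower())]
--
--     if not components:
--         components = ["Web Server", "Database"]
--     if not connections:
--         connections = ["Web Server -> Database"]
--     return components, connections
-- ===== Notes on version B (the rewrite author's own statement) =====
-- stated objective: alternative
-- what changed: Replaced A's single interleaved state machine (section flags toggled while extracting in the same loop) by a group-then-process decomposition: one grouping pass buckets each stripped line under the most recent section header, then a separate component pass and a filter comprehension build the two lists.
import Mathlib
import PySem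

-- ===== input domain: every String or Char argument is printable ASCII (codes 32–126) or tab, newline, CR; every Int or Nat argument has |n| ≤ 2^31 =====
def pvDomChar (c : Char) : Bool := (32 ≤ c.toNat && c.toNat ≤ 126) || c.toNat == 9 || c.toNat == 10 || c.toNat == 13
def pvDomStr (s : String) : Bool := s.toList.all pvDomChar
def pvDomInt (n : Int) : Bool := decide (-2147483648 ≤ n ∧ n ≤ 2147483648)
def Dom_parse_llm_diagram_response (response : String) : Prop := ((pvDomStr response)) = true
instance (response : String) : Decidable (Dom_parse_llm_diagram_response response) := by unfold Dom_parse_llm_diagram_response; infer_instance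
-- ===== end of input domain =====

-- ===== PORT A =====
-- B changes the decomposition: A is one interleaved state machine over the lines; B first
-- groups lines into section buckets, then processes each bucket in its own pass (objective: alternative).
def pvStepA : List String × List String × Bool × Bool → String → List String × List String × Bool × Bool
  | (comps, conns, inC, inK), raw =>
    if PySem.Str.isIn "components:" (PySem.Str.lower (PySem.Str.strip raw)) then
      (comps, conns, true, false)
    else if PySem.Str.isIn "connections:" (PySem.Str.lower (PySem.Str.strip raw)) then
      (comps, conns, false, true)
    else if inC && !(PySem.Str.strip raw == "") && !(PySem.Str.startswith (PySem.Str.strip raw) "-") then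
      if !((if PySem.Str.isIn ":" (PySem.Str.strip raw) then
              PySem.Str.strip (PySem.List.pyGetD ((PySem.Str.split? (PySem.Str.strip raw) ":").getD []) 1 "")
            else PySem.Str.strip (PySem.Str.strip raw)) == "") then
        (comps ++ [if PySem.Str.isIn ":" (PySem.Str.strip raw) then
              PySem.Str.strip (PySem.List.pyGetD ((PySem.Str.split? (PySem.Str.strip raw) ":").getD []) 1 "")
            else PySem.Str.strip (PySem.Str.strip raw)], conns, inC, inK)
      else (comps, conns, inC, inK)
    else if inK && !(PySem.Str.strip raw == "") && !(PySem.Str.startswith (PySem.Str.strip raw) "-") then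
      if PySem.Str.isIn "->" (PySem.Str.strip raw) ||
         PySem.Str.isIn "connects" (PySem.Str.lower (PySem.Str.strip raw)) then
        (comps, conns ++ [PySem.Str.strip raw], inC, inK)
      else (comps, conns, inC, inK)
    else (comps, conns, inC, inK)

def parse_llm_diagram_response (response : String) : List String × List String :=
  let st := ((PySem.Str.split? response "\n").getD []).foldl pvStepA ([], [], false, false)
  (if st.1 = [] then ["Web Server", "Database"] else st.1,
   if st.2.1 = [] then ["Web Server -> Database"] else st.2.1)

-- ===== PORT B =====
-- grouping pass: each stripped line goes to the bucket of the most recently seen header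
def pvGroupB : List String → Option Char → List String × List String × Option Char
  | [], b => ([], [], b)
  | raw :: rest, b =>
      if PySem.Str.isIn "components:" (PySem.Str.lower (PySem.Str.strip raw)) then
        pvGroupB rest (some 'c')
      else if PySem.Str.isIn "connections:" (PySem.Str.lower (PySem.Str.strip raw)) then
        pvGroupB rest (some 'n')
      else if b == some 'c' then
        (PySem.Str.strip raw :: (pvGroupB rest b).1, (pvGroupB rest b).2.1, (pvGroupB rest b).2.2)
      else if b == some 'n' then
        ((pvGroupB rest b).1, PySem.Str.strip raw :: (pvGroupB rest b).2.1, (pvGroupB rest b).2.2)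
      else pvGroupB rest b

-- component-pass step (the body of Source B's second loop)
def pvCompStep (acc : List String) (line : String) : List String :=
  if !(line == "") && !(PySem.Str.startswith line "-") then
    if !(PySem.Str.strip (if PySem.Str.isIn ":" line then
            PySem.List.pyGetD ((PySem.Str.split? line ":").getD []) 1 "" else line) == "") then
      acc ++ [PySem.Str.strip (if PySem.Str.isIn ":" line then
            PySem.List.pyGetD ((PySem.Str.split? line ":").getD []) 1 "" else line)]
    else acc
  else acc

-- connection-pass predicate (Source B's comprehension filter)
def pvConnPred (line : String) : Bool :=
  !(line == "") && !(PySem.Str.startswith line "-") &&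
    (PySem.Str.isIn "->" line || PySem.Str.isIn "connects" (PySem.Str.lower line))

def parse_llm_diagram_response_alt (response : String) : List String × List String :=
  let g := pvGroupB ((PySem.Str.split? response "\n").getD []) none
  let components := g.1.foldl pvCompStep []
  let connections := g.2.1.filter pvConnPred
  (if components = [] then ["Web Server", "Database"] else components,
   if connections = [] then ["Web Server -> Database"] else connections)

-- ===== PRECONDITION & SPEC =====
def Spec_parse_llm_diagram_response (response : String) (out : List String × List String) : Prop := out = parse_llm_diagram_response_alt response
instance (response : String) (out : List String × List String) : Decidable (Spec_parse_llm_diagram_response response out) := by unfold Spec_parse_llm_diagram_response; infer_instance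

-- ===== CLAIM (what is proved, stated in full; the proofs are below) =====
def Claim_equal_parse_llm_diagram_response : Prop := ∀ (response : String), Dom_parse_llm_diagram_response response → Spec_parse_llm_diagram_response response (parse_llm_diagram_response response)

-- ===== LEMMAS AND PROOFS =====

lemma pvCompStep_out (a : List String) (x : String) :
    pvCompStep a x = a ++ pvCompStep [] x := by
  unfold pvCompStep; split_ifs <;> simp

lemma pvFoldl_compStep_init (l : List String) (a : List String) :
    l.foldl pvCompStep a = a ++ l.foldl pvCompStep [] := by
  induction l generalizing a with
  | nil => simp
  | cons x xs ih =>
      simp only [List.foldl_cons]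
      rw [ih (pvCompStep a x), ih (pvCompStep [] x), pvCompStep_out a x, List.append_assoc]

-- A's step in a components state (non-header line) is exactly B's component-pass step
lemma pvStepA_comp (cs ks : List String) (raw : String)
    (h1 : ¬ PySem.Str.isIn "components:" (PySem.Str.lower (PySem.Str.strip raw)) = true)
    (h2 : ¬ PySem.Str.isIn "connections:" (PySem.Str.lower (PySem.Str.strip raw)) = true) :
    pvStepA (cs, ks, true, false) raw = (pvCompStep cs (PySem.Str.strip raw), ks, true, false) := by
  simp only [pvStepA, pvCompStep, Bool.true_and]
  rw [if_neg h1, if_neg h2]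
  split_ifs <;> simp_all

-- A's step in a connections state (non-header line) appends exactly when B's filter keeps the line
lemma pvStepA_conn (cs ks : List String) (raw : String)
    (h1 : ¬ PySem.Str.isIn "components:" (PySem.Str.lower (PySem.Str.strip raw)) = true)
    (h2 : ¬ PySem.Str.isIn "connections:" (PySem.Str.lower (PySem.Str.strip raw)) = true) :
    pvStepA (cs, ks, false, true) raw =
      (cs, if pvConnPred (PySem.Str.strip raw) then ks ++ [PySem.Str.strip raw] else ks, false, true) := by
  simp only [pvStepA, pvConnPred, Bool.true_and, Bool.false_and]
  rw [if_neg h1, if_neg h2]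
  split_ifs <;> simp_all

-- A's step in the no-section-yet (or unreachable) state does nothing on a non-header line
lemma pvStepA_skip (cs ks : List String) (raw : String) (bc bn : Bool)
    (h1 : ¬ PySem.Str.isIn "components:" (PySem.Str.lower (PySem.Str.strip raw)) = true)
    (h2 : ¬ PySem.Str.isIn "connections:" (PySem.Str.lower (PySem.Str.strip raw)) = true)
    (hbc : bc = false) (hbn : bn = false) :
    pvStepA (cs, ks, bc, bn) raw = (cs, ks, bc, bn) := by
  subst hbc hbn
  simp only [pvStepA, Bool.false_and]
  rw [if_neg h1, if_neg h2]
  split_ifs <;> simp_all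

-- A's interleaved loop equals B's group-then-process passes, from any aligned start state
lemma pvLoop_eq (ls : List String) : ∀ (cs ks : List String) (b : Option Char),
    ls.foldl pvStepA (cs, ks, b == some 'c', b == some 'n') =
      (cs ++ (pvGroupB ls b).1.foldl pvCompStep [],
       ks ++ (pvGroupB ls b).2.1.filter pvConnPred,
       (pvGroupB ls b).2.2 == some 'c', (pvGroupB ls b).2.2 == some 'n') := by
  induction ls with
  | nil => intro cs ks b; simp [pvGroupB]
  | cons raw rest ih =>
      intro cs ks b
      have hG : pvGroupB (raw :: rest) b =
          (if PySem.Str.isIn "components:" (PySem.Str.lower (PySem.Str.strip raw)) then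
            pvGroupB rest (some 'c')
          else if PySem.Str.isIn "connections:" (PySem.Str.lower (PySem.Str.strip raw)) then
            pvGroupB rest (some 'n')
          else if b == some 'c' then
            (PySem.Str.strip raw :: (pvGroupB rest b).1, (pvGroupB rest b).2.1, (pvGroupB rest b).2.2)
          else if b == some 'n' then
            ((pvGroupB rest b).1, PySem.Str.strip raw :: (pvGroupB rest b).2.1, (pvGroupB rest b).2.2)
          else pvGroupB rest b) := rfl
      rw [List.foldl_cons, hG]
      by_cases h1 : PySem.Str.isIn "components:" (PySem.Str.lower (PySem.Str.strip raw)) = true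
      · have hA : pvStepA (cs, ks, b == some 'c', b == some 'n') raw = (cs, ks, true, false) := by
          simp only [pvStepA]; rw [if_pos h1]
        rw [hA, if_pos h1]
        have h := ih cs ks (some 'c')
        rwa [(by decide : ((some 'c' : Option Char) == some 'c') = true),
             (by decide : ((some 'c' : Option Char) == some 'n') = false)] at h
      · rw [if_neg h1]
        by_cases h2 : PySem.Str.isIn "connections:" (PySem.Str.lower (PySem.Str.strip raw)) = true
        · have hA : pvStepA (cs, ks, b == some 'c', b == some 'n') raw = (cs, ks, false, true) := by
            simp only [pvStepA]; rw [if_neg h1, if_pos h2]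
          rw [hA, if_pos h2]
          have h := ih cs ks (some 'n')
          rwa [(by decide : ((some 'n' : Option Char) == some 'c') = false),
               (by decide : ((some 'n' : Option Char) == some 'n') = true)] at h
        · rw [if_neg h2]
          by_cases hc : (b == some 'c') = true
          · have hb : b = some 'c' := eq_of_beq hc
            subst hb
            rw [(by decide : ((some 'c' : Option Char) == some 'c') = true),
                (by decide : ((some 'c' : Option Char) == some 'n') = false),
                if_pos (rfl : (true : Bool) = true)]
            rw [pvStepA_comp cs ks raw h1 h2]
            have h := ih (pvCompStep cs (PySem.Str.strip raw)) ks (some 'c')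
            rw [(by decide : ((some 'c' : Option Char) == some 'c') = true),
                (by decide : ((some 'c' : Option Char) == some 'n') = false)] at h
            rw [h]
            simp only [List.foldl_cons]
            rw [pvFoldl_compStep_init _ (pvCompStep [] (PySem.Str.strip raw)),
                pvCompStep_out cs (PySem.Str.strip raw), List.append_assoc]
          · rw [if_neg hc]
            by_cases hn : (b == some 'n') = true
            · have hb : b = some 'n' := eq_of_beq hn
              subst hb
              rw [(by decide : ((some 'n' : Option Char) == some 'c') = false),
                  (by decide : ((some 'n' : Option Char) == some 'n') = true),
                  if_pos (rfl : (true : Bool) = true)]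
              rw [pvStepA_conn cs ks raw h1 h2]
              by_cases hp : pvConnPred (PySem.Str.strip raw) = true
              · rw [if_pos hp]
                have h := ih cs (ks ++ [PySem.Str.strip raw]) (some 'n')
                rw [(by decide : ((some 'n' : Option Char) == some 'c') = false),
                    (by decide : ((some 'n' : Option Char) == some 'n') = true)] at h
                rw [h, List.filter_cons_of_pos hp, List.append_assoc]
                rfl
              · rw [if_neg hp]
                have h := ih cs ks (some 'n')
                rw [(by decide : ((some 'n' : Option Char) == some 'c') = false),
                    (by decide : ((some 'n' : Option Char) == some 'n') = true)] at h
                rw [h, List.filter_cons_of_neg hp]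
            · rw [if_neg hn]
              rw [pvStepA_skip cs ks raw _ _ h1 h2
                    ((Bool.not_eq_true _).mp hc) ((Bool.not_eq_true _).mp hn)]
              exact ih cs ks b

-- ===== VERDICT (by name: the statement is the Claim_ definition above) =====
theorem parse_llm_diagram_response_spec : Claim_equal_parse_llm_diagram_response := by
  intro response _
  unfold Spec_parse_llm_diagram_response parse_llm_diagram_response parse_llm_diagram_response_alt
  have h := pvLoop_eq ((PySem.Str.split? response "\n").getD []) [] [] none
  rw [(by decide : ((none : Option Char) == some 'c') = false),
      (by decide : ((none : Option Char) == some 'n') = false)] at h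
  rw [h]
  simp
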